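-- pv_equiv track=rewrite | github.com/CristianGastonUrbina/Curso_Python | Clase07/random_walk.py | trayectoria
-- ===== SOURCE A (Python) =====
-- def trayectoria(graficos,larga=False):
--     """
--     Parameters
--     ----------
--     graficos : array de caminatas
--         array que contiene todas las caminatas realizadas.
--
--     larga : TYPE, optional
--         si es False se retorna el indice de la caminata mas corta
--         si es True se retorna el indice de la caminata mas larga
--         . The default is False.
--     Returns
--     -------
--     res : entero
--         Retorna el indice de la caminata que menos se aleja , la que mas se aleja si
--         larga = True
--     """
--     valores_finales = [grafico[-1] for grafico in graficos] #Se toman solo los valores finales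
--
--     for i,valor in enumerate(valores_finales): #se calcula el modulo
--         if valor < 0:
--             valores_finales[i]= valor*-1
--
--     if larga:
--         res = valores_finales.index(max(valores_finales))
--     else:
--         res = valores_finales.index(min(valores_finales))
--
--     return res
-- ===== SOURCE B (Python) =====
-- def trayectoria(graficos, larga=False):
--     best_idx = -1
--     best_val = None
--     for i, g in enumerate(graficos):
--         v = g[-1]
--         if v < 0:
--             v = -v
--         if best_val is None or (best_val < v if larga else v < best_val):
--             best_idx, best_val = i, v
--     if best_val is None:
--         raise ValueError("trayectoria() arg is an empty sequence")
--     return best_idx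
-- ===== Notes on version B (the rewrite author's own statement) =====
-- stated objective: alternative
-- what changed: Replaced A's four passes (build final-values list, in-place abs loop, min/max scan, .index scan) by one enumerate pass keeping a running best index/value, updating only on strict improvement so the first extremum wins.
import Mathlib
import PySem

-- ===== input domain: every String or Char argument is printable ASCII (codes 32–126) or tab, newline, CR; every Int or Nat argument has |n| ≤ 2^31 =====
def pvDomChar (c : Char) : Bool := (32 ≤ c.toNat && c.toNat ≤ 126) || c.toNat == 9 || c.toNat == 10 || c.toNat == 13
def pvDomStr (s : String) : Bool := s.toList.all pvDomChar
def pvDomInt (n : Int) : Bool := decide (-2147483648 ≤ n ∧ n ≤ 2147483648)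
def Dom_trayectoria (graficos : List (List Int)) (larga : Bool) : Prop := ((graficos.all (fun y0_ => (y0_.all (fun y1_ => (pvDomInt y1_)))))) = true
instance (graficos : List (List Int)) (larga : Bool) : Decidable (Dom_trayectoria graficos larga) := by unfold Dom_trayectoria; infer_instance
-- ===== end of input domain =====

-- B replaces A's four passes (final-values list, in-place abs loop, min/max scan, .index scan)
-- by a single enumerate pass keeping a running best index/value (strict-improvement updates).


-- ===== PORT A =====
def trayectoria (graficos : List (List Int)) (larga : Bool) : Int :=
  -- valores_finales = [grafico[-1] for grafico in graficos]   (grafico[-1] raises on [] → excluded by Pre_)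
  let valores_finales0 := graficos.map (fun grafico => (PySem.List.pyGet? grafico (-1)).getD 0)
  -- 'for i,valor in enumerate(valores_finales): if valor < 0: valores_finales[i] = valor*-1'
  -- each slot is rewritten once from its own old value, so the in-place pass is this map (exact)
  let valores_finales := valores_finales0.map (fun valor => if valor < 0 then valor * -1 else valor)
  if larga then
    (((PySem.List.index? valores_finales ((PySem.List.max? valores_finales (fun y => y)).getD 0)).getD 0 : Nat) : Int)
  else
    (((PySem.List.index? valores_finales ((PySem.List.min? valores_finales (fun y => y)).getD 0)).getD 0 : Nat) : Int)

-- ===== PORT B =====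
-- one loop step of Source B: state = (best_idx, best_val as Option — None before the first walk)
def pvStepB (larga : Bool) (st : Int × Option Int) (p : Int × List Int) : Int × Option Int :=
  let v0 := (PySem.List.pyGet? p.2 (-1)).getD 0
  let v := if v0 < 0 then -v0 else v0
  match st.2 with
  | none => (p.1, some v)
  | some bv => if (if larga then bv < v else v < bv) then (p.1, some v) else st

def trayectoria_alt (graficos : List (List Int)) (larga : Bool) : Int :=
  let r := (PySem.List.enumerate graficos 0).foldl (pvStepB larga) (-1, none)
  match r.2 with
  | none => 0   -- Python B raises ValueError here (empty graficos) — excluded by Pre_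
  | some _ => r.1

-- ===== PRECONDITION & SPEC =====
-- Pre_ excludes exactly the inputs on which Python A raises: empty graficos (min()/max() of an
-- empty sequence, ValueError) and any empty walk (grafico[-1], IndexError). B raises there too.
def Pre_trayectoria (graficos : List (List Int)) (larga : Bool) : Prop :=
  graficos ≠ [] ∧ ∀ g ∈ graficos, g ≠ []
instance (graficos : List (List Int)) (larga : Bool) : Decidable (Pre_trayectoria graficos larga) := by unfold Pre_trayectoria; infer_instance
def pvWitness_trayectoria : List (List Int) × Bool := ([[1, -3], [2], [0, 5]], false)

def Spec_trayectoria (graficos : List (List Int)) (larga : Bool) (out : Int) : Prop := out = trayectoria_alt graficos larga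
instance (graficos : List (List Int)) (larga : Bool) (out : Int) : Decidable (Spec_trayectoria graficos larga out) := by unfold Spec_trayectoria; infer_instance

-- ===== CLAIM (what is proved, stated in full; the proofs are below) =====
def Claim_equal_trayectoria : Prop := ∀ (graficos : List (List Int)) (larga : Bool), Dom_trayectoria graficos larga → Pre_trayectoria graficos larga → Spec_trayectoria graficos larga (trayectoria graficos larga)

-- ===== LEMMAS AND PROOFS =====

-- the per-walk value both programs compute: |g[-1]| (0 only on the excluded empty walk)
def pvFVal (g : List Int) : Int :=
  let v0 := (PySem.List.pyGet? g (-1)).getD 0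
  if v0 < 0 then -v0 else v0

theorem pvStepB_some (larga : Bool) (bi bv : Int) (p : Int × List Int) :
    pvStepB larga (bi, some bv) p =
      if (if larga then bv < pvFVal p.2 else pvFVal p.2 < bv) then (p.1, some (pvFVal p.2))
      else (bi, some bv) := by
  simp [pvStepB, pvFVal]

-- closed form of B's loop (larga = false), running from an initialised state (bi, some bv):
-- the best value becomes the running min of bv and the remaining values; the best index stays bi
-- when bv is never strictly beaten, else moves to i + (first index of the min among the rest).
theorem pvFold_min :
    ∀ (gs : List (List Int)) (i bi bv : Int),
      (PySem.List.enumerate gs i).foldl (pvStepB false) (bi, some bv) =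
        ((if (gs.map pvFVal).foldl min bv = bv then bi
          else i + (((PySem.List.index? (gs.map pvFVal) ((gs.map pvFVal).foldl min bv)).getD 0 : Nat) : Int)),
         some ((gs.map pvFVal).foldl min bv)) := by
  intro gs
  induction gs with
  | nil => intro i bi bv; simp [PySem.List.enumerate_nil]
  | cons g rest ih =>
    intro i bi bv
    rw [PySem.List.enumerate_cons]
    simp only [List.foldl_cons, pvStepB_some, List.map_cons]
    set v := pvFVal g with hv
    set ws := rest.map pvFVal with hws
    by_cases h : v < bv
    · rw [if_pos (by simpa using h), ih (i + 1) i v]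
      have hmin : min bv v = v := by omega
      rw [hmin]
      set bw := ws.foldl min v with hbw
      have hle : bw ≤ v := (PySem.List.foldl_min_le ws v).1
      have hne : bw ≠ bv := by omega
      rw [if_neg hne]
      by_cases hbwv : bw = v
      · rw [if_pos hbwv, hbwv, PySem.List.index?_cons_self]
        simp
      · rw [if_neg hbwv]
        have hmem : bw ∈ ws := by
          rcases PySem.List.foldl_min_mem ws v with h' | h'
          · exact absurd h' hbwv
          · exact h'
        obtain ⟨k, hk⟩ := Option.isSome_iff_exists.mp ((PySem.List.index?_isSome_iff ws bw).mpr hmem)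
        rw [PySem.List.index?_cons_of_ne ws (fun e => hbwv e.symm), hk]
        simp only [Option.map_some, Option.getD_some, Prod.mk.injEq, and_true]
        push_cast
        omega
    · rw [if_neg (by simpa using h), ih (i + 1) bi bv]
      have hmin : min bv v = bv := by omega
      rw [hmin]
      set bw := ws.foldl min bv with hbw
      by_cases hbv : bw = bv
      · rw [if_pos hbv, if_pos hbv]
      · rw [if_neg hbv, if_neg hbv]
        have hle : bw ≤ bv := (PySem.List.foldl_min_le ws bv).1
        have hnev : bw ≠ v := by omega
        have hmem : bw ∈ ws := by
          rcases PySem.List.foldl_min_mem ws bv with h' | h'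
          · exact absurd h' hbv
          · exact h'
        obtain ⟨k, hk⟩ := Option.isSome_iff_exists.mp ((PySem.List.index?_isSome_iff ws bw).mpr hmem)
        rw [PySem.List.index?_cons_of_ne ws (fun e => hnev e.symm), hk]
        simp only [Option.map_some, Option.getD_some, Prod.mk.injEq, and_true]
        push_cast
        omega

-- the same closed form for larga = true, with max in place of min
theorem pvFold_max :
    ∀ (gs : List (List Int)) (i bi bv : Int),
      (PySem.List.enumerate gs i).foldl (pvStepB true) (bi, some bv) =
        ((if (gs.map pvFVal).foldl max bv = bv then bi
          else i + (((PySem.List.index? (gs.map pvFVal) ((gs.map pvFVal).foldl max bv)).getD 0 : Nat) : Int)),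
         some ((gs.map pvFVal).foldl max bv)) := by
  intro gs
  induction gs with
  | nil => intro i bi bv; simp [PySem.List.enumerate_nil]
  | cons g rest ih =>
    intro i bi bv
    rw [PySem.List.enumerate_cons]
    simp only [List.foldl_cons, pvStepB_some, List.map_cons]
    set v := pvFVal g with hv
    set ws := rest.map pvFVal with hws
    by_cases h : bv < v
    · rw [if_pos (by simpa using h), ih (i + 1) i v]
      have hmax : max bv v = v := by omega
      rw [hmax]
      set bw := ws.foldl max v with hbw
      have hle : v ≤ bw := (PySem.List.le_foldl_max ws v).1
      have hne : bw ≠ bv := by omega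
      rw [if_neg hne]
      by_cases hbwv : bw = v
      · rw [if_pos hbwv, hbwv, PySem.List.index?_cons_self]
        simp
      · rw [if_neg hbwv]
        have hmem : bw ∈ ws := by
          rcases PySem.List.foldl_max_mem ws v with h' | h'
          · exact absurd h' hbwv
          · exact h'
        obtain ⟨k, hk⟩ := Option.isSome_iff_exists.mp ((PySem.List.index?_isSome_iff ws bw).mpr hmem)
        rw [PySem.List.index?_cons_of_ne ws (fun e => hbwv e.symm), hk]
        simp only [Option.map_some, Option.getD_some, Prod.mk.injEq, and_true]
        push_cast
        omega
    · rw [if_neg (by simpa using h), ih (i + 1) bi bv]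
      have hmax : max bv v = bv := by omega
      rw [hmax]
      set bw := ws.foldl max bv with hbw
      by_cases hbv : bw = bv
      · rw [if_pos hbv, if_pos hbv]
      · rw [if_neg hbv, if_neg hbv]
        have hle : bv ≤ bw := (PySem.List.le_foldl_max ws bv).1
        have hnev : bw ≠ v := by omega
        have hmem : bw ∈ ws := by
          rcases PySem.List.foldl_max_mem ws bv with h' | h'
          · exact absurd h' hbv
          · exact h'
        obtain ⟨k, hk⟩ := Option.isSome_iff_exists.mp ((PySem.List.index?_isSome_iff ws bw).mpr hmem)
        rw [PySem.List.index?_cons_of_ne ws (fun e => hnev e.symm), hk]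
        simp only [Option.map_some, Option.getD_some, Prod.mk.injEq, and_true]
        push_cast
        omega

-- A's two-map final-values list is the map of pvFVal
theorem pvVals_eq (graficos : List (List Int)) :
    (graficos.map (fun grafico => (PySem.List.pyGet? grafico (-1)).getD 0)).map
        (fun valor => if valor < 0 then valor * -1 else valor) = graficos.map pvFVal := by
  rw [List.map_map]
  refine List.map_congr_left (fun g _ => ?_)
  simp only [Function.comp, pvFVal]
  split_ifs with h <;> ring

-- ===== VERDICT (by name: the statement is the Claim_ definition above) =====
theorem trayectoria_spec : Claim_equal_trayectoria := by
  intro graficos larga _ hpre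
  unfold Spec_trayectoria trayectoria trayectoria_alt
  obtain ⟨hne, -⟩ := hpre
  obtain ⟨g, gs, rfl⟩ := List.exists_cons_of_ne_nil hne
  rw [PySem.List.enumerate_cons]
  simp only [List.foldl_cons]
  have hstep : pvStepB larga (-1, none) (0, g) = (0, some (pvFVal g)) := by
    simp [pvStepB, pvFVal]
  rw [hstep, pvVals_eq]
  cases larga
  · rw [pvFold_min gs (0+1) 0 (pvFVal g)]
    simp only [List.map_cons, PySem.List.min?_id_cons, Option.getD_some, if_false,
      Bool.false_eq_true]
    set v := pvFVal g with hv
    set ws := gs.map pvFVal with hws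
    set bw := ws.foldl min v with hbw
    by_cases hbv : bw = v
    · rw [if_pos hbv, hbv, PySem.List.index?_cons_self]
      simp
    · rw [if_neg hbv]
      have hle : bw ≤ v := (PySem.List.foldl_min_le ws v).1
      have hmem : bw ∈ ws := by
        rcases PySem.List.foldl_min_mem ws v with h' | h'
        · exact absurd h' hbv
        · exact h'
      obtain ⟨k, hk⟩ := Option.isSome_iff_exists.mp ((PySem.List.index?_isSome_iff ws bw).mpr hmem)
      rw [PySem.List.index?_cons_of_ne ws (fun e => hbv e.symm), hk]
      simp only [Option.map_some, Option.getD_some]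
      push_cast
      omega
  · rw [pvFold_max gs (0+1) 0 (pvFVal g)]
    simp only [List.map_cons, PySem.List.max?_id_cons, Option.getD_some, if_true]
    set v := pvFVal g with hv
    set ws := gs.map pvFVal with hws
    set bw := ws.foldl max v with hbw
    by_cases hbv : bw = v
    · rw [if_pos hbv, hbv, PySem.List.index?_cons_self]
      simp
    · rw [if_neg hbv]
      have hle : v ≤ bw := (PySem.List.le_foldl_max ws v).1
      have hmem : bw ∈ ws := by
        rcases PySem.List.foldl_max_mem ws v with h' | h'
        · exact absurd h' hbv
        · exact h'
      obtain ⟨k, hk⟩ := Option.isSome_iff_exists.mp ((PySem.List.index?_isSome_iff ws bw).mpr hmem)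
      rw [PySem.List.index?_cons_of_ne ws (fun e => hbv e.symm), hk]
      simp only [Option.map_some, Option.getD_some]
      push_cast
      omega
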